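-- pv_equiv track=rewrite | github.com/ElectrolyteProject/SPARK | main.py | find_documents
-- ===== SOURCE A (Python) =====
-- from collections import defaultdict
--
-- def find_documents(input_data, target_document):
--
--     # 使用 defaultdict 来合并相同 Document 的内容
--     merged_data = defaultdict(list)
--     for entry in input_data:
--         document = entry['Document']
--         paragraph = entry['Paragraph'].replace('\n', ' ').strip()
--         merged_data[document].append(paragraph)
--
--     # 查找特定 Document 的段落
--     if target_document in merged_data:
--         result = ' '.join(merged_data[target_document])
--     else:
--         result = f"Document '{target_document}' not found."
--
--     return result
-- ===== SOURCE B (Python) =====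
-- def find_documents(input_data, target_document):
--     # One pass joining on the fly: no dict, no list of paragraphs is ever built.
--     result = None
--     for entry in input_data:
--         if entry['Document'] == target_document:
--             paragraph = entry['Paragraph'].replace('\n', ' ').strip()
--             result = paragraph if result is None else result + ' ' + paragraph
--     if result is None:
--         return f"Document '{target_document}' not found."
--     return result
-- ===== Notes on version B (the rewrite author's own statement) =====
-- stated objective: simpler
-- what changed: Replaces the defaultdict that groups the paragraphs of every document (followed by a membership test and a join) with a single pass carrying an Optional string accumulator that concatenates the target's cleaned paragraphs on the fly, so neither a dict nor a paragraph list is ever built.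
import Mathlib
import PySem

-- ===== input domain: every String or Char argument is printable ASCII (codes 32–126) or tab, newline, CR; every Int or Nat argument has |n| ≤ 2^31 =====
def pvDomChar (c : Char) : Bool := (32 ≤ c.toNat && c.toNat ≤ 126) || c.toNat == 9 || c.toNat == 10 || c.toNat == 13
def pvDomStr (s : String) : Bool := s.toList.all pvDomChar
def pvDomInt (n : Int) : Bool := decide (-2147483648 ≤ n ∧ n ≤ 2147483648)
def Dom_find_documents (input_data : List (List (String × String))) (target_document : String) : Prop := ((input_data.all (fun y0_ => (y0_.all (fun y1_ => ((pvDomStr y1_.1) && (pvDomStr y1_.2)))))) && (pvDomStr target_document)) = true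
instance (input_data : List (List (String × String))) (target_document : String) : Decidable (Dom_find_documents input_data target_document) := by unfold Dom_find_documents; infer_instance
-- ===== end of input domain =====

-- B replaces A's dict-of-all-documents grouping by a single pass with an Optional string
-- accumulator that joins on the fly (simpler decomposition); the return value is proved identical
-- on Pre_. No argument is mutated.

-- ===== PORT A =====
-- groups the cleaned paragraphs of EVERY document into a dict, then looks the target up
def find_documents (input_data : List (List (String × String))) (target_document : String) : String :=
  let merged : PySem.Dict String (List String) := input_data.foldl
    (fun d entry =>
      d.modify ((PySem.Dict.mk entry).getD "Document" "") []
        (· ++ [PySem.Str.strip (PySem.Str.replace ((PySem.Dict.mk entry).getD "Paragraph" "") "\n" " ")]))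
    PySem.Dict.empty
  if merged.contains target_document then
    PySem.Str.join " " (merged.getD target_document [])
  else
    "Document '" ++ target_document ++ "' not found."

-- ===== PORT B =====
-- one pass; result is None until the first match, then the running concatenation
def find_documents_alt (input_data : List (List (String × String))) (target_document : String) : String :=
  let result : Option String := input_data.foldl
    (fun result entry =>
      if (PySem.Dict.mk entry).getD "Document" "" == target_document then
        let paragraph := PySem.Str.strip (PySem.Str.replace ((PySem.Dict.mk entry).getD "Paragraph" "") "\n" " ")
        some (match result with
              | none => paragraph
              | some s => s ++ " " ++ paragraph)
      else result)
    none
  match result with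
  | none => "Document '" ++ target_document ++ "' not found."
  | some s => s

-- ===== PRECONDITION & SPEC =====
-- Pre_ excludes exactly the inputs where Python A raises KeyError: an entry missing the
-- 'Document' or 'Paragraph' key.
def Pre_find_documents (input_data : List (List (String × String))) (target_document : String) : Prop :=
  ∀ entry ∈ input_data, "Document" ∈ entry.map Prod.fst ∧ "Paragraph" ∈ entry.map Prod.fst
instance (input_data : List (List (String × String))) (target_document : String) : Decidable (Pre_find_documents input_data target_document) := by unfold Pre_find_documents; infer_instance
def pvWitness_find_documents : (List (List (String × String))) × String :=
  ([[("Document", "d1"), ("Paragraph", "p one")], [("Document", "d2"), ("Paragraph", "q")]], "d1")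

def Spec_find_documents (input_data : List (List (String × String))) (target_document : String) (out : String) : Prop := out = find_documents_alt input_data target_document
instance (input_data : List (List (String × String))) (target_document : String) (out : String) : Decidable (Spec_find_documents input_data target_document out) := by unfold Spec_find_documents; infer_instance

-- ===== CLAIM (what is proved, stated in full; the proofs are below) =====
def Claim_equal_find_documents : Prop := ∀ (input_data : List (List (String × String))) (target_document : String), Dom_find_documents input_data target_document → Pre_find_documents input_data target_document → Spec_find_documents input_data target_document (find_documents input_data target_document)

-- ===== LEMMAS AND PROOFS =====

-- the value A's dict holds at the target is exactly the filtered list of cleaned paragraphs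
theorem pv_getD_merged (input_data : List (List (String × String))) (t : String) :
    ((input_data.foldl
      (fun d entry =>
        d.modify ((PySem.Dict.mk entry).getD "Document" "") []
          (· ++ [PySem.Str.strip (PySem.Str.replace ((PySem.Dict.mk entry).getD "Paragraph" "") "\n" " ")]))
      (PySem.Dict.empty : PySem.Dict String (List String))).getD t [])
    = (input_data.filter (fun entry => (PySem.Dict.mk entry).getD "Document" "" == t)).map
        (fun entry => PySem.Str.strip (PySem.Str.replace ((PySem.Dict.mk entry).getD "Paragraph" "") "\n" " ")) := by
  have h := PySem.Dict.getD_foldl_modify_append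
    (l := input_data.map (fun entry =>
      (((PySem.Dict.mk entry).getD "Document" ""),
       PySem.Str.strip (PySem.Str.replace ((PySem.Dict.mk entry).getD "Paragraph" "") "\n" " "))))
    (d := (PySem.Dict.empty : PySem.Dict String (List String))) (c := t)
  simp only [List.foldl_map] at h
  rw [h]
  simp [List.filter_map, List.map_map, Function.comp_def]

-- A's membership test holds iff the filtered list is nonempty
theorem pv_contains_merged (input_data : List (List (String × String))) (t : String) :
    ((input_data.foldl
      (fun d entry =>
        d.modify ((PySem.Dict.mk entry).getD "Document" "") []
          (· ++ [PySem.Str.strip (PySem.Str.replace ((PySem.Dict.mk entry).getD "Paragraph" "") "\n" " ")]))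
      (PySem.Dict.empty : PySem.Dict String (List String))).contains t)
    = !(input_data.filter (fun entry => (PySem.Dict.mk entry).getD "Document" "" == t)).isEmpty := by
  rw [PySem.Dict.contains_eq_decide_mem_keys]
  rw [PySem.Dict.keys_foldl_modify_key
    (key := fun entry => (PySem.Dict.mk entry).getD "Document" "")]
  simp only [PySem.Set.mem_update, PySem.Dict.keys_empty, List.not_mem_nil, false_or]
  by_cases hex : ∃ a ∈ input_data, t = (PySem.Dict.mk a).getD "Document" ""
  · obtain ⟨a, ha, hta⟩ := hex
    have : (PySem.Dict.mk a).getD "Document" "" == t := by simp [hta]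
    simp only [List.mem_map]
    rw [decide_eq_true (by exact ⟨a, ha, hta.symm⟩), List.isEmpty_eq_false_iff_exists_mem.mpr
      ⟨a, List.mem_filter.mpr ⟨ha, this⟩⟩]
    rfl
  · simp only [List.mem_map]
    rw [decide_eq_false (by simpa [eq_comm] using hex)]
    have : (input_data.filter (fun entry => (PySem.Dict.mk entry).getD "Document" "" == t)) = [] := by
      rw [List.filter_eq_nil_iff]; intro a ha
      simp only [beq_iff_eq]
      exact fun h => hex ⟨a, ha, h.symm⟩
    simp [this]

-- B's fold from a some-state concatenates the remaining matches onto the accumulator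
theorem pv_optfold_some (input_data : List (List (String × String))) (t s : String) :
    input_data.foldl
      (fun result entry =>
        if (PySem.Dict.mk entry).getD "Document" "" == t then
          some (match result with
                | none => PySem.Str.strip (PySem.Str.replace ((PySem.Dict.mk entry).getD "Paragraph" "") "\n" " ")
                | some s => s ++ " " ++ PySem.Str.strip (PySem.Str.replace ((PySem.Dict.mk entry).getD "Paragraph" "") "\n" " "))
        else result) (some s)
    = some (((input_data.filter (fun entry => (PySem.Dict.mk entry).getD "Document" "" == t)).map
        (fun entry => PySem.Str.strip (PySem.Str.replace ((PySem.Dict.mk entry).getD "Paragraph" "") "\n" " "))).foldl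
        (fun a p => a ++ " " ++ p) s) := by
  induction input_data generalizing s with
  | nil => rfl
  | cons x xs ih =>
    simp only [List.foldl_cons, List.filter_cons]
    by_cases hx : ((PySem.Dict.mk x).getD "Document" "" == t) = true
    · simp only [hx, if_true, List.map_cons, List.foldl_cons]
      exact ih _
    · simp only [eq_false_of_ne_true hx]
      exact ih _

-- B's whole fold, characterised by the filtered list of cleaned paragraphs
theorem pv_optfold_none (input_data : List (List (String × String))) (t : String) :
    input_data.foldl
      (fun result entry =>
        if (PySem.Dict.mk entry).getD "Document" "" == t then
          some (match result with
                | none => PySem.Str.strip (PySem.Str.replace ((PySem.Dict.mk entry).getD "Paragraph" "") "\n" " ")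
                | some s => s ++ " " ++ PySem.Str.strip (PySem.Str.replace ((PySem.Dict.mk entry).getD "Paragraph" "") "\n" " "))
        else result) none
    = match (input_data.filter (fun entry => (PySem.Dict.mk entry).getD "Document" "" == t)).map
        (fun entry => PySem.Str.strip (PySem.Str.replace ((PySem.Dict.mk entry).getD "Paragraph" "") "\n" " ")) with
      | [] => none
      | p :: ps => some (ps.foldl (fun a q => a ++ " " ++ q) p) := by
  induction input_data with
  | nil => rfl
  | cons x xs ih =>
    simp only [List.foldl_cons, List.filter_cons]
    by_cases hx : ((PySem.Dict.mk x).getD "Document" "" == t) = true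
    · simp only [hx, if_true, List.map_cons]
      rw [pv_optfold_some]
    · simp only [eq_false_of_ne_true hx]
      exact ih

-- ' '.join over a nonempty list is the left fold of ' '-separated concatenation
theorem pv_join_eq_foldl (p : String) (ps : List String) :
    PySem.Str.join " " (p :: ps) = ps.foldl (fun a q => a ++ " " ++ q) p := by
  induction ps generalizing p with
  | nil =>
    have h := PySem.Chars.join_singleton (sep := " ".toList) (p := p.toList)
    apply String.toList_injective
    simpa using h
  | cons q ps ih =>
    have h1 : PySem.Str.join " " (p :: q :: ps) = PySem.Str.join " " ((p ++ " " ++ q) :: ps) := by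
      rcases ps with _ | ⟨r, rs⟩ <;>
        (apply String.toList_injective;
         simp [PySem.Chars.join_cons_cons, PySem.Chars.join_singleton])
    rw [h1, ih]
    rfl

-- ===== VERDICT (by name: the statement is the Claim_ definition above) =====
theorem find_documents_spec : Claim_equal_find_documents := by
  intro input_data target_document _ _
  show find_documents input_data target_document = find_documents_alt input_data target_document
  unfold find_documents find_documents_alt
  simp only []
  rw [pv_contains_merged, pv_getD_merged, pv_optfold_none]
  cases h : (input_data.filter
      (fun entry => (PySem.Dict.mk entry).getD "Document" "" == target_document)).map
      (fun entry => PySem.Str.strip (PySem.Str.replace ((PySem.Dict.mk entry).getD "Paragraph" "") "\n" " ")) with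
  | nil =>
    have : (input_data.filter
      (fun entry => (PySem.Dict.mk entry).getD "Document" "" == target_document)).isEmpty := by
      simpa using congrArg List.isEmpty h
    simp [this]
  | cons p ps =>
    have : (input_data.filter
      (fun entry => (PySem.Dict.mk entry).getD "Document" "" == target_document)).isEmpty = false := by
      rcases List.map_eq_cons_iff.mp h with ⟨a, l', hf, _⟩
      simp [hf]
    simp [this, pv_join_eq_foldl]
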